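-- pv_equiv track=rewrite | github.com/mattaq31/Hash-CAD | GUI/server_helper_functions.py | break_dict_by_plates
-- ===== SOURCE A (Python) =====
-- def break_dict_by_plates(dict):
--     # Initialize the new dictionary to hold separate dictionaries for each <PLATE>
--     separated_dicts = {}
--
--     # Iterate through the original dictionary
--     for key, value in dict.items():
--         # Extract the <PLATE> value
--         plate = value.split('-plate:')[1]
--
--         # Initialize the dictionary for this <PLATE> if it doesn't already exist
--         if plate not in separated_dicts:
--             separated_dicts[plate] = {}
--
--         # Add the entry to the appropriate dictionary
--         separated_dicts[plate][key] = value.split('-plate:')[0]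
--
--     return separated_dicts
-- ===== SOURCE B (Python) =====
-- def break_dict_by_plates(dict):
--     # Pass 1: collect the distinct plate suffixes in order of first appearance.
--     plates = []
--     for value in dict.values():
--         plate = value.split('-plate:')[1]
--         if plate not in plates:
--             plates.append(plate)
--     # Pass 2: one filtering comprehension per plate builds its inner dictionary.
--     return {plate: {key: value.split('-plate:')[0]
--                     for key, value in dict.items()
--                     if value.split('-plate:')[1] == plate}
--             for plate in plates}
-- ===== Notes on version B (the rewrite author's own statement) =====
-- stated objective: alternative
-- what changed: Replaces hash-bucket accumulation into nested dicts during a single mutating pass by a two-phase plan: first collect the distinct plate suffixes in first-appearance order, then build each plate's inner dict with one filtering comprehension over the items.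
import Mathlib
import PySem

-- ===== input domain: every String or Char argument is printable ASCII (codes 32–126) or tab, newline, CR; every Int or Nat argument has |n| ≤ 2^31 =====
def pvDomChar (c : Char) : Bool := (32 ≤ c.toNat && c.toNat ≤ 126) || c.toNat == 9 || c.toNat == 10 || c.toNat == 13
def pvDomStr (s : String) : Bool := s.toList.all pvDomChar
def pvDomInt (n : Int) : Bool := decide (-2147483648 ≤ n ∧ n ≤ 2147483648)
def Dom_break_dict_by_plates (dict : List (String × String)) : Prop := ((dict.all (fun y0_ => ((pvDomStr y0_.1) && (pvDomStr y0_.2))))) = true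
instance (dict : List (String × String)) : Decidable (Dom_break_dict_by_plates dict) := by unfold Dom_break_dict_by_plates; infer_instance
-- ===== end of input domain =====

-- B re-implements the grouping as: distinct plates in first-appearance order, then one filter pass per plate;
-- the return values agree (alternative decomposition, no speed claim).

-- value.split('-plate:')[1]  (shared subexpression of both Pythons; none = IndexError, excluded by Pre_)
def pvPlate (v : String) : String := (PySem.List.pyGet? ((PySem.Str.split? v "-plate:").getD []) 1).getD ""
-- value.split('-plate:')[0]  (always exists: split yields at least one piece)
def pvPrefix (v : String) : String := (PySem.List.pyGet? ((PySem.Str.split? v "-plate:").getD []) 0).getD ""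

-- ===== PORT A =====
-- loop body of A (one iteration of 'for key, value in dict.items()')
def pvStepA (sd : PySem.Dict String (PySem.Dict String String)) (kv : String × String) :
    PySem.Dict String (PySem.Dict String String) :=
  let plate := pvPlate kv.2
  let sd := if !sd.contains plate then sd.insert plate PySem.Dict.empty else sd
  sd.insert plate ((sd.getD plate PySem.Dict.empty).insert kv.1 (pvPrefix kv.2))

def break_dict_by_plates (dict : List (String × String)) : List (String × List (String × String)) :=
  let separated := dict.foldl pvStepA PySem.Dict.empty
  separated.items.map (fun pr => (pr.1, pr.2.items))

-- ===== PORT B =====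
def break_dict_by_plates_alt (dict : List (String × String)) : List (String × List (String × String)) :=
  let plates := dict.foldl
    (fun ps kv => if ps.contains (pvPlate kv.2) then ps else ps ++ [pvPlate kv.2]) ([] : List String)
  plates.map (fun p =>
    (p, (dict.filter (fun kv => pvPlate kv.2 == p)).map (fun kv => (kv.1, pvPrefix kv.2))))

-- ===== PRECONDITION & SPEC =====
-- Pre_ excludes (a) values not containing '-plate:', on which Python A raises IndexError, and
-- (b) lists with duplicate keys, which cannot arise from a Python dict argument.
def Pre_break_dict_by_plates (dict : List (String × String)) : Prop :=
  (∀ kv ∈ dict, 2 ≤ ((PySem.Str.split? kv.2 "-plate:").getD []).length) ∧ (dict.map Prod.fst).Nodup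
instance (dict : List (String × String)) : Decidable (Pre_break_dict_by_plates dict) := by
  unfold Pre_break_dict_by_plates; infer_instance
def pvWitness_break_dict_by_plates : (List (String × String)) :=
  [("k1", "a-plate:P1"), ("k2", "b-plate:P2"), ("k3", "c-plate:P1")]
def Spec_break_dict_by_plates (dict : List (String × String)) (out : List (String × List (String × String))) : Prop := out = break_dict_by_plates_alt dict
instance (dict : List (String × String)) (out : List (String × List (String × String))) : Decidable (Spec_break_dict_by_plates dict out) := by unfold Spec_break_dict_by_plates; infer_instance

-- ===== CLAIM (what is proved, stated in full; the proofs are below) =====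
def Claim_equal_break_dict_by_plates : Prop := ∀ (dict : List (String × String)), Dom_break_dict_by_plates dict → Pre_break_dict_by_plates dict → Spec_break_dict_by_plates dict (break_dict_by_plates dict)

-- ===== LEMMAS AND PROOFS =====

-- the plate-collecting loop of B is exactly Set.ofList of the mapped plates
lemma pvPlatesFold (xs : List (String × String)) :
    xs.foldl (fun ps kv => if ps.contains (pvPlate kv.2) then ps else ps ++ [pvPlate kv.2])
       ([] : List String)
      = PySem.Set.ofList (xs.map (fun kv => pvPlate kv.2)) := by
  rw [← PySem.Set.update_empty (xs.map (fun kv => pvPlate kv.2)),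
      PySem.Set.update_map_eq_foldl_add]
  apply PySem.List.foldl_congr_mem
  intro ps kv _
  rw [PySem.Set.add_eq_ite]
  by_cases h : pvPlate kv.2 ∈ ps <;> simp [h]

-- characterisation of A's accumulation loop
def pvGrp (xs : List (String × String)) (p : String) : List (String × String) :=
  (xs.filter (fun kv => pvPlate kv.2 == p)).map (fun kv => (kv.1, pvPrefix kv.2))

def pvF (xs : List (String × String)) (p : String) : String × PySem.Dict String String :=
  (p, PySem.Dict.mk (pvGrp xs p))

lemma pvGrp_append (xs : List (String × String)) (x : String × String) (q : String) :
    pvGrp (xs ++ [x]) q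
      = pvGrp xs q ++ (if pvPlate x.2 == q then [(x.1, pvPrefix x.2)] else []) := by
  unfold pvGrp
  rw [List.filter_append]
  by_cases h : pvPlate x.2 == q <;> simp [h]

lemma pvGrp_of_ne (xs : List (String × String)) (x : String × String) (q : String)
    (h : pvPlate x.2 ≠ q) : pvGrp (xs ++ [x]) q = pvGrp xs q := by
  rw [pvGrp_append]; simp [h]

lemma pvGrp_nil_of_not_mem (xs : List (String × String)) (p : String)
    (h : p ∉ xs.map (fun kv => pvPlate kv.2)) : pvGrp xs p = [] := by
  unfold pvGrp
  have : xs.filter (fun kv => pvPlate kv.2 == p) = [] := by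
    rw [List.filter_eq_nil_iff]
    intro kv hkv hbe
    exact h (List.mem_map.mpr ⟨kv, hkv, by simpa using hbe⟩)
  simp [this]

lemma pvKeys_mkF (xs : List (String × String)) (P : List String) :
    (PySem.Dict.mk (P.map (pvF xs))).keys = P := by
  simp [PySem.Dict.keys, Function.comp_def, pvF]

lemma pvFoldA_eq (xs : List (String × String)) (hnd : (xs.map Prod.fst).Nodup) :
    xs.foldl pvStepA PySem.Dict.empty
      = PySem.Dict.mk ((PySem.Set.ofList (xs.map (fun kv => pvPlate kv.2))).map (pvF xs)) := by
  induction xs using List.reverseRecOn with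
  | nil => rfl
  | append_singleton xs x ih =>
    have hnd' : (xs.map Prod.fst).Nodup := by
      simpa using (List.nodup_append.mp (by simpa using hnd)).1
    have hx : x.1 ∉ xs.map Prod.fst := by
      have h2 := hnd
      rw [List.map_append, List.map_cons, List.map_nil] at h2
      exact fun h => (List.nodup_append.mp h2).2.2 _ h _ (by simp) rfl
    rw [List.foldl_append, ih hnd', List.foldl_cons, List.foldl_nil]
    set P := PySem.Set.ofList (xs.map (fun kv => pvPlate kv.2)) with hP
    have hPnd : P.Nodup := PySem.Set.nodup_ofList _
    have hkeys : (PySem.Dict.mk (P.map (pvF xs))).keys = P := pvKeys_mkF xs P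
    have hofl : PySem.Set.ofList ((xs ++ [x]).map (fun kv => pvPlate kv.2))
        = PySem.Set.add P (pvPlate x.2) := by
      rw [List.map_append]; simpa using PySem.Set.ofList_append_singleton _ _
    by_cases hc : pvPlate x.2 ∈ P
    · -- the plate is already a key: A overwrites in place, B's plate list is unchanged
      have hcont : (PySem.Dict.mk (P.map (pvF xs))).contains (pvPlate x.2) = true := by
        rw [PySem.Dict.contains_iff_mem_keys, hkeys]; exact hc
      have hmem : (pvPlate x.2, PySem.Dict.mk (pvGrp xs (pvPlate x.2)))
          ∈ (P.map (pvF xs)) := List.mem_map.mpr ⟨_, hc, rfl⟩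
      have hgetD : (PySem.Dict.mk (P.map (pvF xs))).getD (pvPlate x.2) PySem.Dict.empty
          = PySem.Dict.mk (pvGrp xs (pvPlate x.2)) :=
        PySem.Dict.getD_of_mem_items _ hmem (by rw [hkeys]; exact hPnd) _
      have hinnerkeys : (PySem.Dict.mk (pvGrp xs (pvPlate x.2))).contains x.1 = false := by
        rw [Bool.eq_false_iff, Ne, PySem.Dict.contains_iff_mem_keys]
        intro hmemk
        apply hx
        have : x.1 ∈ (pvGrp xs (pvPlate x.2)).map Prod.fst := by
          simpa [PySem.Dict.keys, PySem.Dict.items] using hmemk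
        rcases List.mem_map.mp this with ⟨pr, hpr, hfst⟩
        rcases List.mem_map.mp (by exact hpr : pr ∈ pvGrp xs (pvPlate x.2)) with ⟨kv, hkv, hkveq⟩
        exact List.mem_map.mpr ⟨kv, List.mem_of_mem_filter hkv, by rw [← hkveq] at hfst; simpa using hfst⟩
      have hinner : (PySem.Dict.mk (pvGrp xs (pvPlate x.2))).insert x.1 (pvPrefix x.2)
          = PySem.Dict.mk (pvGrp (xs ++ [x]) (pvPlate x.2)) := by
        apply PySem.Dict.ext
        rw [PySem.Dict.items_insert_of_not_contains _ _ hinnerkeys]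
        rw [pvGrp_append]
        simp
      rw [hofl, PySem.Set.add_of_mem hc]
      simp only [pvStepA, hcont, Bool.not_true, Bool.false_eq_true, if_false]
      apply PySem.Dict.ext
      rw [PySem.Dict.items_insert_of_contains _ _ hcont, hgetD, hinner]
      show (P.map (pvF xs)).map _ = _
      rw [List.map_map]
      apply List.map_congr_left
      intro q hq
      by_cases hqp : q = pvPlate x.2
      · subst hqp; simp [pvF]
      · have hbe : ¬ (q == pvPlate x.2) = true := by simpa using hqp
        have hgrp : pvGrp (xs ++ [x]) q = pvGrp xs q :=
          pvGrp_of_ne xs x q (fun h => hqp h.symm)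
        simp [pvF, hgrp]
        exact fun h => absurd h hqp
    · -- a fresh plate: A appends a new singleton inner dict, B appends the plate
      have hcont : (PySem.Dict.mk (P.map (pvF xs))).contains (pvPlate x.2) = false := by
        rw [Bool.eq_false_iff, Ne, PySem.Dict.contains_iff_mem_keys, hkeys]; exact hc
      have hnotmem : pvPlate x.2 ∉ xs.map (fun kv => pvPlate kv.2) := by
        rw [hP] at hc; exact fun h => hc ((PySem.Set.mem_ofList _ _).mpr h)
      rw [hofl, PySem.Set.add_of_not_mem hc]
      simp only [pvStepA, hcont, Bool.not_false]
      rw [if_pos trivial]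
      apply PySem.Dict.ext
      have hcont2 : ((PySem.Dict.mk (P.map (pvF xs))).insert (pvPlate x.2)
          PySem.Dict.empty).contains (pvPlate x.2) = true := PySem.Dict.contains_insert_self _ _ _
      rw [PySem.Dict.items_insert_of_contains _ _ hcont2,
          PySem.Dict.getD_insert_self,
          PySem.Dict.items_insert_of_not_contains _ _ hcont]
      rw [List.map_append, List.map_append]
      congr 1
      · -- existing entries: keys differ from the new plate, the map is the identity on them
        rw [List.map_map]
        apply List.map_congr_left
        intro q hq
        have hqne : ¬ (q == pvPlate x.2) = true := by
          simp only [beq_iff_eq]; rintro rfl; exact hc hq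
        have hqp : ¬ q = pvPlate x.2 := by simpa using hqne
        have hgrp : pvGrp (xs ++ [x]) q = pvGrp xs q :=
          pvGrp_of_ne xs x q (fun h => hqp h.symm)
        simp [pvF, hgrp]
        exact fun h => absurd h hqp
      · -- the appended entry becomes the singleton group of x
        have hgrp : pvGrp (xs ++ [x]) (pvPlate x.2)
            = [(x.1, pvPrefix x.2)] := by
          rw [pvGrp_append, pvGrp_nil_of_not_mem xs _ hnotmem]; simp
        simp [pvF, hgrp]
        rfl

lemma pv_main (dict : List (String × String)) (hnd : (dict.map Prod.fst).Nodup) :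
    break_dict_by_plates dict = break_dict_by_plates_alt dict := by
  unfold break_dict_by_plates break_dict_by_plates_alt
  rw [pvPlatesFold, pvFoldA_eq dict hnd]
  simp [pvF, pvGrp, List.map_map, Function.comp]

-- ===== VERDICT (by name: the statement is the Claim_ definition above) =====
theorem break_dict_by_plates_spec : Claim_equal_break_dict_by_plates := by
  intro dict _ hpre
  exact pv_main dict hpre.2
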